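-- pv_equiv track=rewrite | github.com/qq1176914912/MC-qunluanchuanshuo | 源码/solver.py | min_steps_to_target
-- ===== SOURCE A (Python) =====
-- OPERATIONS = [
--     ("轻击", -3),
--     ("击打", -6),
--     ("冲压", +2),
--     ("弯曲", +7),
--     ("重击", -9),
--     ("牵拉", -15),
--     ("镦锻", +13),
--     ("收缩", +16),
-- ]
--
-- def min_steps_to_target(target: int) -> tuple[int, list[str]]:
--     """
--     用 BFS 求从 0 到 target 的最少步数，以及其中一种操作序列。
--     每种操作可重复使用。
--     返回 (步数, 操作名称列表)，若无法达到则返回 (None, [])。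
--     """
--     if target == 0:
--         return 0, []
--
--     # (当前值, 已选操作列表)
--     from collections import deque
--     q = deque([(0, [])])
--     seen = {0}
--
--     while q:
--         cur, path = q.popleft()
--         for name, val in OPERATIONS:
--             nxt = cur + val
--             if nxt == target:
--                 return len(path) + 1, path + [name]
--             if nxt not in seen:
--                 seen.add(nxt)
--                 q.append((nxt, path + [name]))
--
--     return -1, []
-- ===== SOURCE B (Python) =====
-- OPERATIONS = [
--     ("轻击", -3),
--     ("击打", -6),
--     ("冲压", +2),
--     ("弯曲", +7),
--     ("重击", -9),
--     ("牵拉", -15),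
--     ("镦锻", +13),
--     ("收缩", +16),
-- ]
--
-- def min_steps_to_target(target: int) -> tuple[int, list[str]]:
--     """
--     Same BFS order as the original, but the queue holds bare values and a
--     predecessor map records (parent, op-name); the path is reconstructed
--     once at the end instead of being copied for every enqueued node.
--     """
--     if target == 0:
--         return 0, []
--
--     from collections import deque
--     q = deque([0])
--     pred = {}  # value -> (parent value, operation name)
--
--     while q:
--         cur = q.popleft()
--         for name, val in OPERATIONS:
--             nxt = cur + val
--             if nxt == target:
--                 path = [name]
--                 node = cur
--                 while node != 0:
--                     parent, op = pred[node]
--                     path.append(op)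
--                     node = parent
--                 path.reverse()
--                 return len(path), path
--             if nxt not in pred and nxt != 0:
--                 pred[nxt] = (cur, name)
--                 q.append(nxt)
--
--     return -1, []
-- ===== Notes on version B (the rewrite author's own statement) =====
-- stated objective: faster
-- what changed: The BFS queue no longer carries a full copy of the operation path for every node; B stores bare values plus a predecessor map (value -> (parent, op)) and reconstructs the path once when the target is hit, turning O(path-length) list copying per enqueued node into O(1).
import Mathlib
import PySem

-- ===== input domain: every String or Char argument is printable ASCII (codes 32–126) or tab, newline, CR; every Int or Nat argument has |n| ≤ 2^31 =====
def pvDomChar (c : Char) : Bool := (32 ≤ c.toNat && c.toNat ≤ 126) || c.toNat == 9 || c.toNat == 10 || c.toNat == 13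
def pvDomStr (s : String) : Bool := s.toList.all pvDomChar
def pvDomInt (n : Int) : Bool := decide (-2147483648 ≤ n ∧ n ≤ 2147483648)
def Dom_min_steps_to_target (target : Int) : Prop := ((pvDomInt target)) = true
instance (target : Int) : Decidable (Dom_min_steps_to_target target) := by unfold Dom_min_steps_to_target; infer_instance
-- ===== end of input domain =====

-- B replaces A's per-node path copying in the BFS queue by a predecessor map with a single
-- path reconstruction at the end (same BFS order, hence identical results); objective: faster.
-- Both ports run their loops on the same generous fuel (Python's `while q` never terminates
-- by exhaustion here); the fuel guard only makes the recursion total.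

-- ===== PORT A =====
def pvOps : List (String × Int) :=
  [("轻击", -3), ("击打", -6), ("冲压", 2), ("弯曲", 7),
   ("重击", -9), ("牵拉", -15), ("镦锻", 13), ("收缩", 16)]

def pvFuel (target : Int) : Nat := 64 * (target.natAbs + 2) + 64

-- the `for name, val in OPERATIONS` body of A: early return, else extend seen/queue
def pvInnerA (target cur : Int) (path : List String) :
    List (String × Int) → PySem.Set Int → List (Int × List String) →
      Option (Int × List String) × PySem.Set Int × List (Int × List String)
  | [], seen, acc => (none, seen, acc)
  | (name, val) :: rest, seen, acc =>
    let nxt := cur + val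
    if nxt = target then (some ((path.length : Int) + 1, path ++ [name]), seen, acc)
    else if seen.contains nxt then pvInnerA target cur path rest seen acc
    else pvInnerA target cur path rest (seen.add nxt) (acc ++ [(nxt, path ++ [name])])

-- the `while q` loop of A (fuel-guarded)
def pvLoopA (target : Int) : Nat → List (Int × List String) → PySem.Set Int → Int × List String
  | 0, _, _ => (-1, [])
  | _ + 1, [], _ => (-1, [])
  | fuel + 1, (cur, path) :: q, seen =>
    match pvInnerA target cur path pvOps seen q with
    | (some res, _, _) => res
    | (none, seen', q') => pvLoopA target fuel q' seen'

def min_steps_to_target (target : Int) : Int × List String :=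
  if target = 0 then (0, [])
  else pvLoopA target (pvFuel target) [(0, [])] (PySem.Set.ofList [0])

-- ===== PORT B =====
-- B's `pred` is a Python dict observed only through `in`, `pred[k]` and item assignment
-- (its iteration order is never used), so it is ported as the hash map it is in Python.
-- `while node != 0: parent, op = pred[node]; path.append(op); node = parent` (fuel-guarded;
-- a `none` is Python's unreachable KeyError)
def pvRecon (pred : Std.HashMap Int (Int × String)) : Nat → Int → List String → Option (List String)
  | 0, node, path => if node = 0 then some path else none
  | fuel + 1, node, path =>
    if node = 0 then some path
    else
      match pred[node]? with
      | none => none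
      | some (parent, op) => pvRecon pred fuel parent (path ++ [op])

-- the `for name, val in OPERATIONS` body of B
def pvInnerB (target cur : Int) :
    List (String × Int) → Std.HashMap Int (Int × String) → List Int →
      Option (Int × List String) × Std.HashMap Int (Int × String) × List Int
  | [], pred, acc => (none, pred, acc)
  | (name, val) :: rest, pred, acc =>
    let nxt := cur + val
    if nxt = target then
      match pvRecon pred pred.size cur [name] with
      | some path => (some ((path.reverse.length : Int), path.reverse), pred, acc)
      | none => (some (-1, []), pred, acc)   -- unreachable: pred chains always end at 0
    else if pred.contains nxt = false ∧ nxt ≠ 0 then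
      pvInnerB target cur rest (pred.insert nxt (cur, name)) (acc ++ [nxt])
    else pvInnerB target cur rest pred acc

-- the `while q` loop of B (fuel-guarded)
def pvLoopB (target : Int) : Nat → List Int → Std.HashMap Int (Int × String) → Int × List String
  | 0, _, _ => (-1, [])
  | _ + 1, [], _ => (-1, [])
  | fuel + 1, cur :: q, pred =>
    match pvInnerB target cur pvOps pred q with
    | (some res, _, _) => res
    | (none, pred', q') => pvLoopB target fuel q' pred'

def min_steps_to_target_alt (target : Int) : Int × List String :=
  if target = 0 then (0, [])
  else pvLoopB target (pvFuel target) [0] (∅ : Std.HashMap Int (Int × String))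

-- ===== PRECONDITION & SPEC =====
def Spec_min_steps_to_target (target : Int) (out : Int × List String) : Prop := out = min_steps_to_target_alt target
instance (target : Int) (out : Int × List String) : Decidable (Spec_min_steps_to_target target out) := by unfold Spec_min_steps_to_target; infer_instance

-- ===== CLAIM (what is proved, stated in full; the proofs are below) =====
def Claim_equal_min_steps_to_target : Prop := ∀ (target : Int), Dom_min_steps_to_target target → Spec_min_steps_to_target target (min_steps_to_target target)

-- ===== LEMMAS AND PROOFS =====

-- B's predecessor chain from v down to 0, listing the op names from v upward
def pvChain (pred : Std.HashMap Int (Int × String)) : Int → List String → Prop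
  | v, [] => v = 0
  | v, op :: rest => ∃ p, pred[v]? = some (p, op) ∧ pvChain pred p rest

lemma pvChain_insert {pred : Std.HashMap Int (Int × String)} {k : Int} {w : Int × String}
    (hk : pred[k]? = none) :
    ∀ {r : List String} {v : Int}, pvChain pred v r → pvChain (pred.insert k w) v r := by
  intro r
  induction r with
  | nil => intro v h; exact h
  | cons op rest ih =>
    rintro v ⟨p, hv, hrest⟩
    refine ⟨p, ?_, ih hrest⟩
    have hne : ¬(k == v) := by simp; rintro rfl; rw [hk] at hv; cases hv
    rw [Std.HashMap.getElem?_insert, if_neg hne, hv]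

lemma pvRecon_ok {pred : Std.HashMap Int (Int × String)} (h0 : pred[(0 : Int)]? = none) :
    ∀ (r : List String) (v : Int) (acc : List String) (fuel : Nat),
      pvChain pred v r → r.length ≤ fuel → pvRecon pred fuel v acc = some (acc ++ r) := by
  intro r
  induction r with
  | nil =>
    intro v acc fuel hc _
    simp only [pvChain] at hc
    subst hc
    cases fuel <;> simp [pvRecon]
  | cons op rest ih =>
    rintro v acc fuel ⟨p, hv, hrest⟩ hlen
    have hv0 : v ≠ 0 := by rintro rfl; rw [h0] at hv; cases hv
    obtain ⟨f, rfl⟩ : ∃ f, fuel = f + 1 := by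
      cases fuel with
      | zero => simp at hlen
      | succ f => exact ⟨f, rfl⟩
    rw [pvRecon, if_neg hv0, hv]
    show pvRecon pred f p (acc ++ [op]) = _
    rw [ih p (acc ++ [op]) f hrest (by simp at hlen; omega)]
    simp

-- the joint loop invariant
def pvInv (seen : PySem.Set Int) (pred : Std.HashMap Int (Int × String))
    (qA : List (Int × List String)) (qB : List Int) : Prop :=
  qB = qA.map Prod.fst ∧
  pred[(0 : Int)]? = none ∧
  (∀ x : Int, seen.contains x = (pred.contains x || decide (x = 0))) ∧
  (∀ v p, (v, p) ∈ qA → pvChain pred v p.reverse ∧ p.length ≤ pred.size)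

lemma pvSet_contains_add (s : PySem.Set Int) (a x : Int) :
    (s.add a).contains x = (s.contains x || x == a) := by
  rw [Bool.eq_iff_iff]
  simp [PySem.Set.mem_add]

lemma pvInner_sync (target cur : Int) (path : List String) :
    ∀ (ops : List (String × Int)) (seen : PySem.Set Int) (pred : Std.HashMap Int (Int × String))
      (accA : List (Int × List String)) (accB : List Int),
      accB = accA.map Prod.fst →
      pred[(0 : Int)]? = none →
      (∀ x : Int, seen.contains x = (pred.contains x || decide (x = 0))) →
      (∀ v p, (v, p) ∈ accA → pvChain pred v p.reverse ∧ p.length ≤ pred.size) →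
      pvChain pred cur path.reverse → path.length ≤ pred.size →
      (pvInnerA target cur path ops seen accA).1 = (pvInnerB target cur ops pred accB).1 ∧
      pvInv (pvInnerA target cur path ops seen accA).2.1 (pvInnerB target cur ops pred accB).2.1
            (pvInnerA target cur path ops seen accA).2.2 (pvInnerB target cur ops pred accB).2.2 := by
  intro ops
  induction ops with
  | nil =>
    intro seen pred accA accB hmap h0 hseen hq hcur hlen
    exact ⟨rfl, hmap, h0, hseen, hq⟩
  | cons hd rest ih =>
    obtain ⟨name, val⟩ := hd
    intro seen pred accA accB hmap h0 hseen hq hcur hlen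
    by_cases ht : cur + val = target
    · -- early return: A has the path at hand, B reconstructs it from pred
      have hrec := pvRecon_ok h0 path.reverse cur [name] pred.size hcur (by simpa using hlen)
      refine ⟨?_, ?_⟩
      · simp only [pvInnerA, pvInnerB, if_pos ht, hrec]
        simp
      · simp only [pvInnerA, pvInnerB, if_pos ht, hrec]
        exact ⟨hmap, h0, hseen, hq⟩
    · have hsc := hseen (cur + val)
      cases hc : seen.contains (cur + val) with
      | false =>
        rw [hc] at hsc
        have hb1 : pred.contains (cur + val) = false := by
          cases h' : pred.contains (cur + val) <;> simp [h'] at hsc ⊢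
        have hne0 : cur + val ≠ 0 := by
          intro h'; rw [h'] at hsc; simp at hsc
        have hget : pred[(cur + val)]? = none := by
          have h' : pred.contains (cur + val) = pred[(cur + val)]?.isSome :=
            Std.HashMap.contains_eq_isSome_getElem?
          rw [hb1] at h'
          exact Option.not_isSome_iff_eq_none.mp (by rw [← h']; simp)
        have hsize : (pred.insert (cur + val) (cur, name)).size = pred.size + 1 := by
          rw [Std.HashMap.size_insert, if_neg]
          rw [Std.HashMap.mem_iff_contains, hb1]
          simp
        have hstep := ih (seen.add (cur + val)) (pred.insert (cur + val) (cur, name))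
            (accA ++ [(cur + val, path ++ [name])]) (accB ++ [cur + val])
            (by simp [hmap])
            (by rw [Std.HashMap.getElem?_insert, if_neg (by simp; omega)]; exact h0)
            (by intro x
                rw [pvSet_contains_add, Std.HashMap.contains_insert, hseen x]
                cases pred.contains x <;> cases hx : (cur + val == x) <;> cases hx2 : (x == cur + val) <;>
                  simp_all [BEq.comm])
            (by rintro v p hv
                rcases List.mem_append.mp hv with hv | hv
                · obtain ⟨hch, hl⟩ := hq v p hv
                  exact ⟨pvChain_insert hget hch, by rw [hsize]; omega⟩
                · simp only [List.mem_singleton, Prod.mk.injEq] at hv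
                  obtain ⟨rfl, rfl⟩ := hv
                  refine ⟨?_, by simp only [List.length_append, List.length_cons, List.length_nil, hsize]; omega⟩
                  rw [List.reverse_append]
                  exact ⟨cur, Std.HashMap.getElem?_insert_self, pvChain_insert hget hcur⟩)
            (pvChain_insert hget hcur)
            (by rw [hsize]; omega)
        simp only [pvInnerA, pvInnerB, if_neg ht, hc, Bool.false_eq_true, if_false,
          if_pos (And.intro hb1 hne0)]
        exact hstep
      | true =>
        have hbf : ¬(pred.contains (cur + val) = false ∧ cur + val ≠ 0) := by
          rw [hc] at hsc
          rintro ⟨h1, h2⟩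
          rw [h1] at hsc
          simp [h2] at hsc
        have hstep := ih seen pred accA accB hmap h0 hseen hq hcur hlen
        simp only [pvInnerA, pvInnerB, if_neg ht, hc, if_true, if_neg hbf]
        exact hstep

lemma pvLoop_sync (target : Int) :
    ∀ (fuel : Nat) (qA : List (Int × List String)) (qB : List Int)
      (seen : PySem.Set Int) (pred : Std.HashMap Int (Int × String)),
      pvInv seen pred qA qB →
      pvLoopA target fuel qA seen = pvLoopB target fuel qB pred := by
  intro fuel
  induction fuel with
  | zero => intro qA qB seen pred _; rfl
  | succ fuel ih =>
    rintro qA qB seen pred ⟨hmap, h0, hseen, hq⟩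
    subst hmap
    cases qA with
    | nil => rfl
    | cons hd restA =>
      obtain ⟨cur, path⟩ := hd
      have hhd := hq cur path List.mem_cons_self
      have hsync := pvInner_sync target cur path pvOps seen pred restA (restA.map Prod.fst) rfl
        h0 hseen (fun v p hv => hq v p (List.mem_cons_of_mem _ hv)) hhd.1 hhd.2
      rw [List.map_cons]
      rw [pvLoopA, pvLoopB]
      rcases hA : pvInnerA target cur path pvOps seen restA with ⟨resA, seen', accA'⟩
      rcases hB : pvInnerB target cur pvOps pred (restA.map Prod.fst) with ⟨resB, pred', accB'⟩
      rw [hA, hB] at hsync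
      obtain ⟨hres, hinv⟩ := hsync
      cases resA with
      | some r =>
        cases resB with
        | none => cases hres
        | some r' => cases hres; rfl
      | none =>
        cases resB with
        | some r' => cases hres
        | none => exact ih accA' accB' seen' pred' hinv

-- ===== VERDICT (by name: the statement is the Claim_ definition above) =====
theorem min_steps_to_target_spec : Claim_equal_min_steps_to_target := by
  intro target _
  unfold Spec_min_steps_to_target min_steps_to_target min_steps_to_target_alt
  by_cases h : target = 0
  · simp [h]
  · simp only [h, if_false]
    apply pvLoop_sync
    refine ⟨rfl, Std.HashMap.getElem?_empty, ?_, ?_⟩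
    · intro x
      simp [PySem.Set.ofList, PySem.Set.add, PySem.Set.contains, Std.HashMap.contains_empty]
    · rintro v p hv
      simp at hv
      obtain ⟨rfl, rfl⟩ := hv
      exact ⟨rfl, by simp⟩
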